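-- pv_equiv track=rewrite | github.com/JohanM-1/Prueba_de_ingreso_North_Market | #1.py | numero_mas_frecuente
-- ===== SOURCE A (Python) =====
-- def numero_mas_frecuente(lista):
--     frecuencia = {}
--     max_frecuencia = 0
--     result = None
--
--     for numero in lista:
--         frecuencia[numero] = frecuencia.get(numero, 0) + 1
--
--         if frecuencia[numero] > max_frecuencia:
--             max_frecuencia = frecuencia[numero]
--             result = numero
--
--         elif frecuencia[numero] == max_frecuencia and (result is None or numero < result):
--             result = numero
--
--     return result
-- ===== SOURCE B (Python) =====
-- def numero_mas_frecuente(lista):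
--     cnt = {}
--     for numero in lista:
--         cnt[numero] = cnt.get(numero, 0) + 1
--     if not cnt:
--         return None
--     m = max(cnt.values())
--     return min(k for k, v in cnt.items() if v == m)
-- ===== Notes on version B (the rewrite author's own statement) =====
-- stated objective: alternative
-- what changed: A maintains a running max-count and running tie-broken result with branching inside the counting loop; B first builds the full frequency dict in one pass and then reduces it: max over the counts, then min over exactly the keys attaining that max.
import Mathlib
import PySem

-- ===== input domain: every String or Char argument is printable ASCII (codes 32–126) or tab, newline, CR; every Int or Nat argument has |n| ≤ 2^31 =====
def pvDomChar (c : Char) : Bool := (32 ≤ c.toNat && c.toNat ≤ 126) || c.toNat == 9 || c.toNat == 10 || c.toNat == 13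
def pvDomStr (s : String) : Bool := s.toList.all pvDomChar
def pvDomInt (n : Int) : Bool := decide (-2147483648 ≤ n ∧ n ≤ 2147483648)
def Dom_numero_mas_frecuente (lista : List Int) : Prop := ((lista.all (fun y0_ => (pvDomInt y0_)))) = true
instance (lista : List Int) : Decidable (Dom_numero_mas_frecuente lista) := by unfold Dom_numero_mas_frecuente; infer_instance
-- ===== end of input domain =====

-- B builds the frequency dict first and then reduces it (max of counts, min of the argmax keys),
-- instead of A's online running-max/running-result maintenance; same O(n) cost, return values proved equal.

-- ===== PORT A =====
-- loop body of A: state = (frecuencia, max_frecuencia, result)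
def pvStepA (s : PySem.Dict Int Int × Int × Option Int) (numero : Int) :
    PySem.Dict Int Int × Int × Option Int :=
  let frecuencia := s.1.insert numero (s.1.getD numero 0 + 1)
  let c := frecuencia.getD numero 0
  if c > s.2.1 then (frecuencia, c, some numero)
  else if c == s.2.1 && (match s.2.2 with | none => true | some r => decide (numero < r)) then
    (frecuencia, s.2.1, some numero)
  else (frecuencia, s.2.1, s.2.2)

def numero_mas_frecuente (lista : List Int) : Option Int :=
  (lista.foldl pvStepA (PySem.Dict.empty, 0, none)).2.2

-- ===== PORT B =====
-- the reduce phase of B: max of the counts, then min over the keys attaining it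
def pvReduceB (cnt : PySem.Dict Int Int) : Option Int :=
  if cnt.items.isEmpty then none
  else
    match PySem.List.max? cnt.values (fun v => v) with
    | none => none  -- unreachable: cnt nonempty
    | some m =>
      PySem.List.min? ((cnt.items.filter (fun p => p.2 == m)).map Prod.fst) (fun k => k)

def numero_mas_frecuente_alt (lista : List Int) : Option Int :=
  pvReduceB (lista.foldl (fun d x => d.insert x (d.getD x 0 + 1)) PySem.Dict.empty)

-- ===== PRECONDITION & SPEC =====
def Spec_numero_mas_frecuente (lista : List Int) (out : Option Int) : Prop := out = numero_mas_frecuente_alt lista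
instance (lista : List Int) (out : Option Int) : Decidable (Spec_numero_mas_frecuente lista out) := by unfold Spec_numero_mas_frecuente; infer_instance

-- ===== CLAIM (what is proved, stated in full; the proofs are below) =====
def Claim_equal_numero_mas_frecuente : Prop := ∀ (lista : List Int), Dom_numero_mas_frecuente lista → Spec_numero_mas_frecuente lista (numero_mas_frecuente lista)

-- ===== LEMMAS AND PROOFS =====

-- the common characterisation: r is the least element among those of maximal multiplicity in l
def pvPred (l : List Int) (r : Int) : Prop :=
  r ∈ l ∧ (∀ x ∈ l, l.count x ≤ l.count r) ∧ (∀ x ∈ l, l.count x = l.count r → r ≤ x)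

lemma pvPred_unique {l : List Int} {r r' : Int} (h : pvPred l r) (h' : pvPred l r') : r = r' := by
  obtain ⟨hm, hmax, hmin⟩ := h
  obtain ⟨hm', hmax', hmin'⟩ := h'
  have hc : l.count r' = l.count r := Nat.le_antisymm (hmax r' hm') (hmax' r hm)
  have h1 : r ≤ r' := hmin r' hm' hc
  have h2 : r' ≤ r := hmin' r hm hc.symm
  omega

lemma pvCount_append (l : List Int) (x y : Int) :
    (l ++ [x]).count y = l.count y + (if y = x then 1 else 0) := by
  rcases eq_or_ne y x with h | h
  · subst h; simp [List.count_append]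
  · simp [List.count_append, h, Ne.symm h]

lemma pvStepA_gt (s : PySem.Dict Int Int × Int × Option Int) (x : Int)
    (h : (s.1.insert x (s.1.getD x 0 + 1)).getD x 0 > s.2.1) :
    pvStepA s x = (s.1.insert x (s.1.getD x 0 + 1), (s.1.insert x (s.1.getD x 0 + 1)).getD x 0, some x) := by
  simp only [pvStepA]; rw [if_pos h]

lemma pvStepA_tie (s : PySem.Dict Int Int × Int × Option Int) (x : Int)
    (h : ¬ (s.1.insert x (s.1.getD x 0 + 1)).getD x 0 > s.2.1)
    (h2 : ((s.1.insert x (s.1.getD x 0 + 1)).getD x 0 == s.2.1 &&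
      (match s.2.2 with | none => true | some r => decide (x < r))) = true) :
    pvStepA s x = (s.1.insert x (s.1.getD x 0 + 1), s.2.1, some x) := by
  simp only [pvStepA]
  rw [if_neg h, if_pos h2]

lemma pvStepA_keep (s : PySem.Dict Int Int × Int × Option Int) (x : Int)
    (h : ¬ (s.1.insert x (s.1.getD x 0 + 1)).getD x 0 > s.2.1)
    (h2 : ((s.1.insert x (s.1.getD x 0 + 1)).getD x 0 == s.2.1 &&
      (match s.2.2 with | none => true | some r => decide (x < r))) = false) :
    pvStepA s x = (s.1.insert x (s.1.getD x 0 + 1), s.2.1, s.2.2) := by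
  simp only [pvStepA]
  rw [if_neg h, if_neg (by rw [h2]; exact Bool.false_ne_true)]

lemma pvA_inv (l : List Int) :
    (l.foldl pvStepA (PySem.Dict.empty, 0, none)).1 = PySem.Dict.counter l ∧
    ((l = [] ∧ (l.foldl pvStepA (PySem.Dict.empty, 0, none)).2 = (0, none)) ∨
     (∃ r, (l.foldl pvStepA (PySem.Dict.empty, 0, none)).2.2 = some r ∧ pvPred l r ∧
        (l.foldl pvStepA (PySem.Dict.empty, 0, none)).2.1 = (l.count r : Int))) := by
  induction l using List.reverseRecOn with
  | nil => exact ⟨rfl, Or.inl ⟨rfl, rfl⟩⟩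
  | append_singleton l x ih =>
    obtain ⟨hd, hres⟩ := ih
    rw [List.foldl_append]
    simp only [List.foldl_cons, List.foldl_nil]
    set s := l.foldl pvStepA (PySem.Dict.empty, 0, none) with hs
    have hcounter : PySem.Dict.counter (l ++ [x]) =
        (PySem.Dict.counter l).insert x ((PySem.Dict.counter l).getD x 0 + 1) := by
      rw [← PySem.Dict.foldl_insert_getD_add_one_eq_counter,
          ← PySem.Dict.foldl_insert_getD_add_one_eq_counter, List.foldl_append]
      rfl
    have hgd : ((s.1.insert x (s.1.getD x 0 + 1)).getD x 0) = (l.count x : Int) + 1 := by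
      rw [hd, PySem.Dict.getD_insert_self, PySem.Dict.getD_counter]
    have hcnt : ∀ y, (l ++ [x]).count y = l.count y + (if y = x then 1 else 0) :=
      pvCount_append l x
    rcases hres with ⟨hnil, h0⟩ | ⟨r, hr, ⟨hmem, hmax, hmin⟩, hM⟩
    · -- empty prefix: the first element becomes the result with count 1
      subst hnil
      have h21 : s.2.1 = 0 := by rw [h0]
      have hstep := pvStepA_gt s x (by rw [hgd, h21]; positivity)
      refine ⟨?_, Or.inr ⟨x, ?_, ⟨by simp, ?_, ?_⟩, ?_⟩⟩
      · rw [hstep, hcounter, hd]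
      · rw [hstep]
      · intro y hy
        have : y = x := by simpa using hy
        subst this; exact le_rfl
      · intro y hy _
        have : y = x := by simpa using hy
        subst this; exact le_rfl
      · rw [hstep]
        show (s.1.insert x (s.1.getD x 0 + 1)).getD x 0 = _
        rw [hgd, hcnt x]
        simp
    · by_cases hgt : (l.count x : Int) + 1 > (l.count r : Int)
      · -- strictly new maximum: x takes over
        have hstep := pvStepA_gt s x (by rw [hgd, hM]; exact hgt)
        refine ⟨?_, Or.inr ⟨x, ?_, ⟨by simp, ?_, ?_⟩, ?_⟩⟩
        · rw [hstep, hcounter, hd]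
        · rw [hstep]
        · intro y hy
          by_cases hyx : y = x
          · subst hyx; exact le_rfl
          · have hy' : y ∈ l := by
              rcases List.mem_append.mp hy with hy' | hy'
              · exact hy'
              · exact absurd (by simpa using hy') hyx
            rw [hcnt y, hcnt x]
            simp [hyx]
            have := hmax y hy'
            omega
        · intro y hy hcy
          rw [hcnt y, hcnt x] at hcy
          by_cases hyx : y = x
          · subst hyx; exact le_rfl
          · exfalso
            rcases List.mem_append.mp hy with hy' | hy'
            · have := hmax y hy'
              simp [hyx] at hcy
              omega
            · exact hyx (by simpa using hy')
        · rw [hstep]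
          show (s.1.insert x (s.1.getD x 0 + 1)).getD x 0 = _
          rw [hgd, hcnt x]
          simp
      · obtain ⟨hte, hlt⟩ | hnotie :
            ((l.count x : Int) + 1 = (l.count r : Int) ∧ x < r) ∨
            ¬ ((l.count x : Int) + 1 = (l.count r : Int) ∧ x < r) := em _
        · -- tie with a smaller value: x takes over
          have hstep := pvStepA_tie s x (by rw [hgd, hM]; exact hgt)
            (by rw [hgd, hM, hr]; simp [hte, hlt])
          refine ⟨?_, Or.inr ⟨x, ?_, ⟨by simp, ?_, ?_⟩, ?_⟩⟩
          · rw [hstep, hcounter, hd]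
          · rw [hstep]
          · intro y hy
            by_cases hyx : y = x
            · subst hyx; exact le_rfl
            · have hy' : y ∈ l := by
                rcases List.mem_append.mp hy with hy' | hy'
                · exact hy'
                · exact absurd (by simpa using hy') hyx
              rw [hcnt y, hcnt x]
              simp [hyx]
              have := hmax y hy'
              omega
          · intro y hy hcy
            rw [hcnt y, hcnt x] at hcy
            by_cases hyx : y = x
            · subst hyx; exact le_rfl
            · rcases List.mem_append.mp hy with hy' | hy'
              · simp [hyx] at hcy
                have hyr : l.count y = l.count r := by omega
                have := hmin y hy' hyr
                omega
              · exact absurd (by simpa using hy') hyx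
          · rw [hstep]
            show s.2.1 = _
            rw [hM, hcnt x]
            simp
            omega
        · -- no change: r remains the least most-frequent element
          have hrx : r ≠ x := by
            intro he; subst he; omega
          have hstep := pvStepA_keep s x (by rw [hgd, hM]; exact hgt) (by
            rw [hgd, hM, hr]
            by_cases he : (l.count x : Int) + 1 = (l.count r : Int)
            · have : ¬ x < r := fun hl => hnotie ⟨he, hl⟩
              simp [this]
            · simp [he])
          refine ⟨?_, Or.inr ⟨r, ?_, ⟨List.mem_append.mpr (Or.inl hmem), ?_, ?_⟩, ?_⟩⟩
          · rw [hstep, hcounter, hd]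
          · rw [hstep]; exact hr
          · intro y hy
            by_cases hyx : y = x
            · rw [hyx, hcnt x, hcnt r]
              simp [hrx]
              omega
            · have hy' : y ∈ l := by
                rcases List.mem_append.mp hy with hy' | hy'
                · exact hy'
                · exact absurd (by simpa using hy') hyx
              rw [hcnt y, hcnt r]
              simp [hyx, hrx]
              exact hmax y hy'
          · intro y hy hcy
            rw [hcnt y, hcnt r] at hcy
            by_cases hyx : y = x
            · subst hyx
              simp at hcy
              have hA : (l.count y : Int) + 1 = (l.count r : Int) := by omega
              have : ¬ y < r := fun hl => hnotie ⟨hA, hl⟩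
              omega
            · simp [hyx] at hcy
              rcases List.mem_append.mp hy with hy' | hy'
              · simp [hrx] at hcy
                exact hmin y hy' hcy
              · exact absurd (by simpa using hy') hyx
          · rw [hstep]
            show s.2.1 = _
            rw [hM, hcnt r]
            simp [hrx]

lemma pvB_some (l : List Int) (h : l ≠ []) :
    ∃ r, numero_mas_frecuente_alt l = some r ∧ pvPred l r := by
  obtain ⟨a, ha⟩ := List.exists_mem_of_ne_nil l h
  unfold numero_mas_frecuente_alt pvReduceB
  rw [PySem.Dict.foldl_insert_getD_add_one_eq_counter]
  have hitems := PySem.Dict.items_counter l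
  have hane : a ∈ PySem.Set.ofList l := (PySem.Set.mem_ofList l a).mpr ha
  have hne : (PySem.Dict.counter l).items ≠ [] := by
    rw [hitems]
    intro hc
    rw [List.map_eq_nil_iff] at hc
    rw [hc] at hane; simp at hane
  have hvals : (PySem.Dict.counter l).values =
      (PySem.Set.ofList l).map (fun k => ((l.count k : Int))) := by
    show (PySem.Dict.counter l).items.map Prod.snd = _
    rw [hitems, List.map_map]; rfl
  have hvne : (PySem.Dict.counter l).values ≠ [] := by
    rw [hvals]; simp only [ne_eq, List.map_eq_nil_iff]
    intro hc; rw [hc] at hane; simp at hane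
  obtain ⟨m, hm⟩ : ∃ m, PySem.List.max? (PySem.Dict.counter l).values (fun v => v) = some m := by
    rcases hmo : PySem.List.max? (PySem.Dict.counter l).values (fun v => v) with _ | m
    · exact absurd ((PySem.List.max?_eq_none_iff _ _).mp hmo) hvne
    · exact ⟨m, rfl⟩
  have hmmem : m ∈ (PySem.Dict.counter l).values := PySem.List.max?_mem hm
  have hmax := PySem.List.max?_isMax hm
  -- every element's count is ≤ m
  have hle : ∀ x ∈ l, (l.count x : Int) ≤ m := by
    intro x hx
    refine hmax _ ?_
    rw [hvals]
    exact List.mem_map.mpr ⟨x, (PySem.Set.mem_ofList l x).mpr hx, rfl⟩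
  -- m is attained
  obtain ⟨k0, hk0mem, hk0⟩ : ∃ k0, k0 ∈ PySem.Set.ofList l ∧ (l.count k0 : Int) = m := by
    rw [hvals] at hmmem
    obtain ⟨k0, hk0, he⟩ := List.mem_map.mp hmmem
    exact ⟨k0, hk0, he⟩
  -- the filtered key list
  have hks : ((PySem.Dict.counter l).items.filter (fun p => p.2 == m)).map Prod.fst =
      (PySem.Set.ofList l).filter (fun k => (l.count k : Int) == m) := by
    rw [hitems, List.filter_map, List.map_map]
    simp [Function.comp_def]
  have hk0ks : k0 ∈ (PySem.Set.ofList l).filter (fun k => (l.count k : Int) == m) := by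
    rw [List.mem_filter]
    exact ⟨hk0mem, by simp [hk0]⟩
  obtain ⟨r, hrmin⟩ : ∃ r, PySem.List.min?
      (((PySem.Dict.counter l).items.filter (fun p => p.2 == m)).map Prod.fst) (fun k => k) = some r := by
    rcases hmo : PySem.List.min?
        (((PySem.Dict.counter l).items.filter (fun p => p.2 == m)).map Prod.fst) (fun k => k) with _ | r
    · have := (PySem.List.min?_eq_none_iff _ _).mp hmo
      rw [hks] at this
      rw [this] at hk0ks; simp at hk0ks
    · exact ⟨r, hmo⟩
  have hrmem : r ∈ (PySem.Set.ofList l).filter (fun k => (l.count k : Int) == m) := by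
    have := PySem.List.min?_mem hrmin
    rwa [hks] at this
  have hrin : r ∈ l := by
    rw [List.mem_filter] at hrmem
    exact (PySem.Set.mem_ofList l r).mp hrmem.1
  have hrcnt : (l.count r : Int) = m := by
    rw [List.mem_filter] at hrmem
    simpa using hrmem.2
  have hrmin' := PySem.List.min?_isMin hrmin
  refine ⟨r, ?_, hrin, ?_, ?_⟩
  · rw [if_neg (by simp [List.isEmpty_iff, hne]), hm]
    exact hrmin
  · intro x hx
    have := hle x hx
    omega
  · intro x hx hcx
    have hxks : x ∈ ((PySem.Dict.counter l).items.filter (fun p => p.2 == m)).map Prod.fst := by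
      rw [hks, List.mem_filter]
      refine ⟨(PySem.Set.mem_ofList l x).mpr hx, by simp [hcx, hrcnt]⟩
    exact hrmin' x hxks

-- ===== VERDICT (by name: the statement is the Claim_ definition above) =====
theorem numero_mas_frecuente_spec : Claim_equal_numero_mas_frecuente := by
  intro lista _
  unfold Spec_numero_mas_frecuente
  by_cases h : lista = []
  · subst h; rfl
  · obtain ⟨_, hres⟩ := pvA_inv lista
    rcases hres with ⟨hnil, _⟩ | ⟨r, hr, hpred, _⟩
    · exact absurd hnil h
    · obtain ⟨r', hr', hpred'⟩ := pvB_some lista h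
      show (lista.foldl pvStepA (PySem.Dict.empty, 0, none)).2.2 = _
      rw [hr, hr', pvPred_unique hpred hpred']
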